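-- pv_equiv track=rewrite | github.com/knyl2013/ds_algo_template | python/prefixAlsoSuffix.py | computePrefixAlsoSuffix
-- ===== SOURCE A (Python) =====
-- from typing import List
--
-- def computePrefixAlsoSuffix(s: str) -> List[bool]:
--     def computeLPSArray(pat: str, M: int, lps: List[int]):
--         len = 0  # length of the previous longest prefix suffix
--         lps[0]
--         i = 1
--         while i < M:
--             if pat[i] == pat[len]:
--                 len += 1
--                 lps[i] = len
--                 i += 1
--             else:
--                 if len != 0:
--                     len = lps[len - 1]
--                 else:
--                     lps[i] = 0
--                     i += 1
--     M = len(s)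
--     lps = [0] * M
--     computeLPSArray(s, M, lps)
--     res = [False] * M
--     cur = M - 1
--     while cur >= 0:
--         res[cur] = True
--         cur = lps[cur] - 1
--     return res
-- ===== SOURCE B (Python) =====
-- from typing import List
--
-- def computePrefixAlsoSuffix(s: str) -> List[bool]:
--     M = len(s)
--     return [s[:L] == s[M - L:] for L in range(1, M + 1)]
-- ===== Notes on version B (the rewrite author's own statement) =====
-- stated objective: simpler
-- what changed: Replaced the KMP failure-function construction and failure-chain walk by a one-line direct check: position L-1 is True iff the length-L prefix equals the length-L suffix.
-- crash fix: On the empty string A raises IndexError (it reads lps[0] of an empty list); B returns []. — e.g. on computePrefixAlsoSuffix(""): A raises IndexError, B returns []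
import Mathlib
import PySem

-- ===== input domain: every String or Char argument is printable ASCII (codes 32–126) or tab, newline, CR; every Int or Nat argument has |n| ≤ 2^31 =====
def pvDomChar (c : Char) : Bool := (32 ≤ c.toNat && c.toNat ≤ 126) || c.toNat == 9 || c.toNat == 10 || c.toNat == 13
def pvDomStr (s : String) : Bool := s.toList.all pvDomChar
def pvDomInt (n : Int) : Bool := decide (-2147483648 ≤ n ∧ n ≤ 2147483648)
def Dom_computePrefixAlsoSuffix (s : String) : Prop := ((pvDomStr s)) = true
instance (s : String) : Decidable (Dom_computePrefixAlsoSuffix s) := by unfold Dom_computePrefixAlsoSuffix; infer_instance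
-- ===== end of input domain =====

-- B replaces A's KMP failure-function construction and failure-chain walk by a direct
-- per-length prefix-vs-suffix comparison: simpler (not faster).

-- ===== PORT A =====
-- the 'while i < M' loop of computeLPSArray; fuel only makes the recursion structural
-- (2*M bounds the iteration count, proved below, so the fuel 2*M passed in never runs out).
-- pat[i], pat[len], lps[len-1], lps[i] are always in range when reached, so getD/set are exact.
def pvLpsLoop (t : List Char) (M : Nat) : Nat → Nat → Nat → List Nat → List Nat
  | 0, _, _, lps => lps
  | fuel+1, len, i, lps =>
    if i < M then
      if t.getD i ' ' == t.getD len ' ' then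
        pvLpsLoop t M fuel (len+1) (i+1) (lps.set i (len+1))
      else if len ≠ 0 then
        pvLpsLoop t M fuel (lps.getD (len-1) 0) i lps
      else
        pvLpsLoop t M fuel 0 (i+1) (lps.set i 0)
    else lps

-- the 'while cur >= 0' loop; cur is a Python int (reaches -1), fuel M+1 suffices (proved below)
def pvResLoop (lps : List Nat) : Nat → Int → List Bool → List Bool
  | 0, _, res => res
  | fuel+1, cur, res =>
    if 0 ≤ cur then
      pvResLoop lps fuel ((lps.getD cur.toNat 0 : Int) - 1) (res.set cur.toNat true)
    else res

def computePrefixAlsoSuffix (s : String) : List Bool :=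
  let t := s.toList
  let M := t.length
  let lps := pvLpsLoop t M (2*M) 0 1 (List.replicate M 0)
  pvResLoop lps (M+1) ((M : Int) - 1) (List.replicate M false)

-- ===== PORT B =====
-- string slices and '==' are ported over the character list (exact for s[:L], s[M-L:], ==)
def computePrefixAlsoSuffix_alt (s : String) : List Bool :=
  let t := s.toList
  let M : Int := t.length
  (PySem.List.pyRange 1 (M + 1) 1).map (fun L =>
    PySem.List.slice t none (some L) == PySem.List.slice t (some (M - L)) none)

-- ===== PRECONDITION & SPEC =====
-- A reads lps[0] of the empty list when s = "" and raises IndexError; Pre_ excludes exactly that input.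
def Pre_computePrefixAlsoSuffix (s : String) : Prop := s ≠ ""
instance (s : String) : Decidable (Pre_computePrefixAlsoSuffix s) := by unfold Pre_computePrefixAlsoSuffix; infer_instance
def pvWitness_computePrefixAlsoSuffix : String := "abab"

-- On the empty string A raises IndexError (it reads lps[0] of an empty list); B returns [].
def Raises_computePrefixAlsoSuffix (s : String) : Prop := s = ""
instance (s : String) : Decidable (Raises_computePrefixAlsoSuffix s) := by unfold Raises_computePrefixAlsoSuffix; infer_instance
def pvRaiseWitness_computePrefixAlsoSuffix : String := ""
def pvRaiseWitnessOut_computePrefixAlsoSuffix : List Bool := []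

def Spec_computePrefixAlsoSuffix (s : String) (out : List Bool) : Prop := out = computePrefixAlsoSuffix_alt s
instance (s : String) (out : List Bool) : Decidable (Spec_computePrefixAlsoSuffix s out) := by unfold Spec_computePrefixAlsoSuffix; infer_instance

-- ===== CLAIM (what is proved, stated in full; the proofs are below) =====
def Claim_equal_computePrefixAlsoSuffix : Prop := ∀ (s : String), Dom_computePrefixAlsoSuffix s → Pre_computePrefixAlsoSuffix s → Spec_computePrefixAlsoSuffix s (computePrefixAlsoSuffix s)
def Claim_raises_computePrefixAlsoSuffix : Prop := (∀ (s : String), Dom_computePrefixAlsoSuffix s → Raises_computePrefixAlsoSuffix s → ¬ Pre_computePrefixAlsoSuffix s) ∧ (Dom_computePrefixAlsoSuffix (pvRaiseWitness_computePrefixAlsoSuffix) ∧ Raises_computePrefixAlsoSuffix (pvRaiseWitness_computePrefixAlsoSuffix) ∧ computePrefixAlsoSuffix_alt (pvRaiseWitness_computePrefixAlsoSuffix) = pvRaiseWitnessOut_computePrefixAlsoSuffix)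

-- ===== LEMMAS AND PROOFS =====

-- 'k is a border of t': the length-k prefix equals the length-k suffix
abbrev pvB (t : List Char) (k : Nat) : Prop := t.take k = t.drop (t.length - k)

-- length of the longest PROPER border
def pvF (t : List Char) : Nat := Nat.findGreatest (fun k => pvB t k) (t.length - 1)

theorem pvB_zero (t : List Char) : pvB t 0 := by simp [pvB]

theorem pvB_full (t : List Char) : pvB t t.length := by simp [pvB]

theorem pvF_le (t : List Char) : pvF t ≤ t.length - 1 := Nat.findGreatest_le _

theorem pvF_lt (t : List Char) (h : t ≠ []) : pvF t < t.length := by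
  have h1 := pvF_le t
  have h2 : 0 < t.length := List.length_pos_iff.mpr h
  omega

theorem pvF_border (t : List Char) : pvB t (pvF t) :=
  Nat.findGreatest_spec (Nat.zero_le _) (pvB_zero t)

theorem pvF_max (t : List Char) (k : Nat) (hk : k ≤ t.length - 1) (h : pvB t k) : k ≤ pvF t :=
  Nat.le_findGreatest hk h

-- a shorter border of t is a border of a longer border of t
theorem pvB_take_of_le (t : List Char) (k j : Nat) (hk : pvB t k) (hj : pvB t j)
    (hjk : j ≤ k) (hkn : k ≤ t.length) : pvB (t.take k) j := by
  unfold pvB at *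
  have hlen : (t.take k).length = k := by simp [List.length_take]; omega
  rw [hlen, List.take_take, min_eq_left hjk, hk, List.drop_drop, hj]
  congr 1
  omega

-- a border of a border of t is a border of t
theorem pvB_of_take (t : List Char) (k j : Nat) (hk : pvB t k) (hkn : k ≤ t.length)
    (hj : pvB (t.take k) j) (hjk : j ≤ k) : pvB t j := by
  unfold pvB at *
  have hlen : (t.take k).length = k := by simp [List.length_take]; omega
  rw [hlen] at hj
  rw [List.take_take, min_eq_left hjk, hk, List.drop_drop] at hj
  rw [hj]
  congr 1
  omega

-- decomposition of borders of t.take (i+1): k+1 is a border iff k is a border of t.take i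
-- and the next character matches t[i]
theorem pvB_succ_iff (t : List Char) (i k : Nat) (hi : i < t.length) (hk : k ≤ i) :
    pvB (t.take (i+1)) (k+1) ↔ (pvB (t.take i) k ∧ t.getD k ' ' = t.getD i ' ') := by
  have hkn : k < t.length := lt_of_le_of_lt hk hi
  have hlen' : (t.take (i+1)).length = i+1 := by simp [List.length_take]; omega
  have hleni : (t.take i).length = i := by simp [List.length_take]; omega
  have h1 : (t.take (i+1)).take (k+1) = t.take k ++ [t.getD k ' '] := by
    rw [List.take_take, min_eq_left (by omega), List.take_add_one]
    simp [List.getElem?_eq_getElem hkn]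
  have hsplit : t.take (i+1) = t.take i ++ [t.getD i ' '] := by
    rw [List.take_add_one]
    simp [List.getElem?_eq_getElem hi]
  have h2 : (t.take (i+1)).drop ((i+1) - (k+1)) = (t.take i).drop (i - k) ++ [t.getD i ' '] := by
    rw [hsplit, List.drop_append_of_le_length (by omega),
      show (i+1) - (k+1) = i - k by omega]
  constructor
  · intro h
    unfold pvB at h
    rw [hlen', h1, h2] at h
    have hlens : (t.take k).length = ((t.take i).drop (i-k)).length := by
      simp [List.length_take, List.length_drop]; omega
    obtain ⟨he, hc⟩ := List.append_inj h hlens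
    refine ⟨?_, by simpa using hc⟩
    unfold pvB
    rw [hleni, List.take_take, min_eq_left hk]
    exact he
  · rintro ⟨hb, hc⟩
    unfold pvB at hb ⊢
    rw [hleni, List.take_take, min_eq_left hk] at hb
    rw [hlen', h1, h2, hb, hc]

-- any positive border of t.take (i+1) of length ≤ i is at most pvF (t.take i) + 1
theorem pvEntry_d (t : List Char) (i : Nat) (hi : i < t.length) :
    ∀ k, 0 < k → k ≤ i → pvB (t.take (i+1)) k → k ≤ pvF (t.take i) + 1 := by
  intro k hk0 hki hkb
  obtain ⟨k', rfl⟩ : ∃ k', k = k' + 1 := ⟨k - 1, by omega⟩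
  have hd := (pvB_succ_iff t i k' hi (by omega)).mp hkb
  have hle : k' ≤ pvF (t.take i) := by
    apply pvF_max
    · simp [List.length_take]; omega
    · exact hd.1
  omega

-- getD after set
theorem pvGetD_set (xs : List Nat) (i j : Nat) (v d : Nat) (hi : i < xs.length) :
    (xs.set i v).getD j d = if i = j then v else xs.getD j d := by
  simp [List.getD, List.getElem?_set, hi]
  split <;> simp_all

theorem pvGetD_set_bool (xs : List Bool) (i j : Nat) (v d : Bool) (hi : i < xs.length) :
    (xs.set i v).getD j d = if i = j then v else xs.getD j d := by
  simp [List.getD, List.getElem?_set, hi]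
  split <;> simp_all

-- main invariant for the LPS loop: on exit lps[j] is the longest-proper-border length
-- of the (j+1)-prefix, for every j
theorem pvLpsLoop_correct (t : List Char) :
    ∀ fuel len i lps, 1 ≤ i → i ≤ t.length → len < i → lps.length = t.length →
    pvB (t.take i) len →
    (i < t.length → ∀ k, 0 < k → k ≤ i → pvB (t.take (i+1)) k → k ≤ len + 1) →
    (∀ j, j < i → lps.getD j 0 = pvF (t.take (j+1))) →
    2*(t.length - i) + len < fuel →
    ∀ j, j < t.length → (pvLpsLoop t t.length fuel len i lps).getD j 0 = pvF (t.take (j+1)) := by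
  intro fuel
  induction fuel with
  | zero => intro len i lps _ _ _ _ _ _ _ hfuel; exact absurd hfuel (by omega)
  | succ fuel ih =>
    intro len i lps hi1 hin hlen hlpslen hbord hd hcorr hfuel j hj
    rw [pvLpsLoop]
    by_cases hiM : i < t.length
    · simp only [if_pos hiM]
      have hlt1 : (t.take (i+1)).length = i+1 := by simp [List.length_take]; omega
      by_cases hmatch : t.getD i ' ' == t.getD len ' '
      · -- match branch: pvF (t.take (i+1)) = len + 1
        simp only [if_pos hmatch]
        have hc : t.getD len ' ' = t.getD i ' ' := (eq_of_beq hmatch).symm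
        have hb' : pvB (t.take (i+1)) (len+1) :=
          (pvB_succ_iff t i len hiM (by omega)).mpr ⟨hbord, hc⟩
        have hF : pvF (t.take (i+1)) = len + 1 := by
          have hle1 : len + 1 ≤ pvF (t.take (i+1)) := pvF_max _ _ (by omega) hb'
          have hge : pvF (t.take (i+1)) ≤ len + 1 := by
            rcases Nat.eq_zero_or_pos (pvF (t.take (i+1))) with h0 | hpos
            · omega
            · exact hd hiM _ hpos (by have := pvF_le (t.take (i+1)); omega)
                (pvF_border (t.take (i+1)))
          omega
        apply ih (len+1) (i+1) (lps.set i (len+1))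
        · omega
        · omega
        · omega
        · simp [hlpslen]
        · exact hb'
        · intro hi1M k hk0 hki hkb
          have := pvEntry_d t (i+1) hi1M k hk0 hki hkb
          omega
        · intro j' hj'
          rw [pvGetD_set _ _ _ _ _ (by omega)]
          by_cases hji : i = j'
          · subst hji; simp [hF]
          · simp only [if_neg hji]; exact hcorr j' (by omega)
        · omega
        · exact hj
      · -- mismatch
        simp only [if_neg hmatch]
        have hnc : t.getD len ' ' ≠ t.getD i ' ' := by
          intro h; exact hmatch (beq_iff_eq.mpr h.symm)
        by_cases hlen0 : len = 0
        · -- len = 0: lps[i] := 0, i += 1;  pvF (t.take (i+1)) = 0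
          subst hlen0
          simp only [if_neg (by simp : ¬ ((0:Nat) ≠ 0))]
          have hF0 : pvF (t.take (i+1)) = 0 := by
            by_contra hne
            have hpos : 0 < pvF (t.take (i+1)) := Nat.pos_of_ne_zero hne
            have hle : pvF (t.take (i+1)) ≤ 0 + 1 :=
              hd hiM _ hpos (by have := pvF_le (t.take (i+1)); omega) (pvF_border _)
            have h1 : pvF (t.take (i+1)) = 1 := by omega
            have hb1 := pvF_border (t.take (i+1))
            rw [h1] at hb1
            have := (pvB_succ_iff t i 0 hiM (Nat.zero_le i)).mp hb1
            exact hnc this.2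
          apply ih 0 (i+1) (lps.set i 0)
          · omega
          · omega
          · omega
          · simp [hlpslen]
          · exact pvB_zero _
          · intro hi1M k hk0 hki hkb
            have := pvEntry_d t (i+1) hi1M k hk0 hki hkb
            omega
          · intro j' hj'
            rw [pvGetD_set _ _ _ _ _ (by omega)]
            by_cases hji : i = j'
            · subst hji; simp [hF0]
            · simp only [if_neg hji]; exact hcorr j' (by omega)
          · omega
          · exact hj
        · -- len ≠ 0: len := lps[len-1]
          simp only [if_pos hlen0]
          have hlenval : lps.getD (len-1) 0 = pvF (t.take len) := by
            have := hcorr (len-1) (by omega)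
            rwa [show len - 1 + 1 = len by omega] at this
          have htlen : (t.take len).length = len := by simp [List.length_take]; omega
          have hnew_lt : pvF (t.take len) < len := by
            have := pvF_lt (t.take len) (by
              intro h; rw [h] at htlen; simp at htlen; omega)
            omega
          have htakei : (t.take i).length = i := by simp [List.length_take]; omega
          have htake2 : (t.take i).take len = t.take len := by
            rw [List.take_take, min_eq_left (by omega)]
          have hbord' : pvB (t.take i) (pvF (t.take len)) := by
            apply pvB_of_take (t.take i) len _ hbord (by omega)
            · rw [htake2]; exact pvF_border _
            · omega
          have hd' : ∀ k, 0 < k → k ≤ i → pvB (t.take (i+1)) k → k ≤ pvF (t.take len) + 1 := by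
            intro k hk0 hki hkb
            have hk_le : k ≤ len + 1 := hd hiM k hk0 hki hkb
            have hk_ne : k ≠ len + 1 := by
              intro h
              subst h
              have := (pvB_succ_iff t i len hiM (by omega)).mp hkb
              exact hnc this.2
            obtain ⟨k', rfl⟩ : ∃ k', k = k' + 1 := ⟨k - 1, by omega⟩
            have hbk' : pvB (t.take i) k' := ((pvB_succ_iff t i k' hiM (by omega)).mp hkb).1
            have : pvB (t.take len) k' := by
              rw [← htake2]
              exact pvB_take_of_le (t.take i) len k' hbord hbk' (by omega) (by omega)
            have := pvF_max (t.take len) k' (by omega) this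
            omega
          rw [hlenval]
          apply ih (pvF (t.take len)) i lps
          · omega
          · omega
          · omega
          · exact hlpslen
          · exact hbord'
          · intro _; exact hd'
          · exact hcorr
          · omega
          · exact hj
    · simp only [if_neg hiM]
      exact hcorr j (by omega)

theorem pvResLoop_length (lps : List Nat) :
    ∀ fuel cur res, (pvResLoop lps fuel cur res).length = res.length := by
  intro fuel
  induction fuel with
  | zero => intro cur res; rfl
  | succ fuel ih =>
    intro cur res
    rw [pvResLoop]
    split
    · rw [ih]; simp
    · rfl

-- the chain walk starting at cur = L-1 marks exactly the border lengths ≤ L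
theorem pvResLoop_correct (t : List Char) (lps : List Nat)
    (hlps : ∀ j, j < t.length → lps.getD j 0 = pvF (t.take (j+1))) :
    ∀ fuel L res, L ≤ t.length → L < fuel → res.length = t.length → (L = 0 ∨ pvB t L) →
    ∀ j, j < t.length →
      (pvResLoop lps fuel ((L:Int) - 1) res).getD j false
        = (res.getD j false || decide (j+1 ≤ L ∧ pvB t (j+1))) := by
  intro fuel
  induction fuel with
  | zero => intro L res _ hL; exact absurd hL (by omega)
  | succ fuel ih =>
    intro L res hLn hLf hres hLb j hj
    rw [pvResLoop]
    by_cases hL0 : L = 0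
    · subst hL0
      have hneg : ¬ ((0:Int) ≤ ((0:Nat):Int) - 1) := by omega
      simp only [if_neg hneg]
      have hd0 : decide (j+1 ≤ 0 ∧ pvB t (j+1)) = false := by
        rw [decide_eq_false_iff_not]; rintro ⟨h, -⟩; omega
      rw [hd0, Bool.or_false]
    · have hL1 : 1 ≤ L := by omega
      have hpos : (0:Int) ≤ (L:Int) - 1 := by omega
      simp only [if_pos hpos]
      have htn : ((L:Int) - 1).toNat = L - 1 := by omega
      have hBL : pvB t L := hLb.resolve_left hL0
      have htlen : (t.take L).length = L := by simp [List.length_take]; omega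
      have hlv : lps.getD ((L:Int) - 1).toNat 0 = pvF (t.take L) := by
        rw [htn]
        have := hlps (L-1) (by omega)
        rwa [show L - 1 + 1 = L by omega] at this
      have hFlt : pvF (t.take L) < L := by
        have := pvF_lt (t.take L) (by
          intro h; rw [h] at htlen; simp at htlen; omega)
        omega
      have hFb : pvB (t.take L) (pvF (t.take L)) := pvF_border _
      rw [hlv]
      have hIH := ih (pvF (t.take L)) (res.set ((L:Int)-1).toNat true)
        (by omega) (by omega) (by simp [hres])
        (by
          rcases Nat.eq_zero_or_pos (pvF (t.take L)) with h0 | hp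
          · exact Or.inl h0
          · exact Or.inr (pvB_of_take t L _ hBL hLn hFb (by omega)))
        j hj
      rw [hIH, htn]
      rw [pvGetD_set_bool _ _ _ _ _ (by omega)]
      by_cases hji : L - 1 = j
      · have hjL : j + 1 = L := by omega
        simp only [if_pos hji, Bool.true_or]
        have : decide (j+1 ≤ L ∧ pvB t (j+1)) = true := by
          rw [decide_eq_true_iff]
          exact ⟨by omega, hjL ▸ hBL⟩
        rw [this, Bool.or_true]
      · simp only [if_neg hji]
        congr 1
        apply decide_eq_decide.mpr
        constructor
        · rintro ⟨h1, h2⟩; exact ⟨by omega, h2⟩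
        · rintro ⟨h1, h2⟩
          have hjL : j + 1 < L := by omega
          have : pvB (t.take L) (j+1) :=
            pvB_take_of_le t L (j+1) hBL h2 (by omega) hLn
          have := pvF_max (t.take L) (j+1) (by omega) this
          exact ⟨this, h2⟩

-- ===== VERDICT (by name: the statement is the Claim_ definition above) =====
theorem computePrefixAlsoSuffix_spec : Claim_equal_computePrefixAlsoSuffix := by
  intro s _ hpre
  unfold Spec_computePrefixAlsoSuffix
  have key : computePrefixAlsoSuffix s
      = pvResLoop (pvLpsLoop s.toList s.toList.length (2*s.toList.length) 0 1
          (List.replicate s.toList.length 0)) (s.toList.length+1)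
          ((s.toList.length:Int) - 1) (List.replicate s.toList.length false) := rfl
  have key2 : computePrefixAlsoSuffix_alt s
      = (PySem.List.pyRange 1 ((s.toList.length:Int) + 1) 1).map (fun L =>
          PySem.List.slice s.toList none (some L)
            == PySem.List.slice s.toList (some ((s.toList.length:Int) - L)) none) := rfl
  rw [key, key2]
  set t := s.toList with ht
  have htne : t ≠ [] := fun h => hpre (String.toList_eq_nil_iff.mp h)
  have hn1 : 1 ≤ t.length := List.length_pos_iff.mpr htne
  have hlps := pvLpsLoop_correct t (2*t.length) 0 1 (List.replicate t.length 0)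
    (le_refl 1) hn1 (by omega) (by simp)
    (pvB_zero _)
    (by intro _ k hk0 hk1 _; omega)
    (by
      intro j hj
      have hj0 : j = 0 := by omega
      subst hj0
      rw [List.getD_replicate _ (by omega)]
      have hl1 : (t.take 1).length = 1 := by simp [List.length_take]; omega
      have h2 := pvF_le (t.take 1)
      rw [hl1] at h2
      simp only [Nat.zero_add]
      omega)
    (by omega)
  have hres := pvResLoop_correct t _ hlps (t.length + 1) t.length
    (List.replicate t.length false) (le_refl _) (by omega) (by simp)
    (Or.inr (pvB_full t))
  have halt : (PySem.List.pyRange 1 ((t.length:Int) + 1) 1).map (fun L =>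
      PySem.List.slice t none (some L) == PySem.List.slice t (some ((t.length:Int) - L)) none)
      = (List.range t.length).map (fun k => decide (pvB t (k+1))) := by
    rw [PySem.List.pyRange_one, List.map_map]
    rw [show (((t.length:Int) + 1) - 1).toNat = t.length by omega]
    apply List.ext_getElem
    · simp
    · intro j hj1 hj2
      simp only [List.getElem_map, List.getElem_range, Function.comp_apply]
      rw [show ((1:Int) + (j:Int)) = ((j+1 : Nat) : Int) by push_cast; ring]
      have hjn : j < t.length := by simpa using hj2
      rw [PySem.List.slice_to t (by omega)]
      rw [PySem.List.slice_from t (by omega)]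
      rw [show (((j+1 : Nat) : Int)).toNat = j + 1 by omega]
      rw [show (((t.length : Int)) - ((j+1 : Nat) : Int)).toNat = t.length - (j+1) by omega]
      by_cases hb : pvB t (j+1)
      · rw [decide_eq_true hb]
        exact beq_iff_eq.mpr hb
      · rw [decide_eq_false hb]
        rw [beq_eq_false_iff_ne]
        exact hb
  rw [halt]
  apply List.ext_getElem
  · rw [pvResLoop_length, List.length_map, List.length_range, List.length_replicate]
  · intro j h1 h2
    have hjn : j < t.length := by
      rw [pvResLoop_length] at h1
      simpa using h1
    have hgd := hres j hjn
    rw [List.getD_eq_getElem _ _ h1] at hgd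
    rw [hgd]
    simp only [List.getD_replicate _ hjn, Bool.false_or]
    rw [List.getElem_map, List.getElem_range]
    apply decide_eq_decide.mpr
    constructor
    · exact fun h => h.2
    · exact fun h => ⟨by omega, h⟩

theorem computePrefixAlsoSuffix_raises : Claim_raises_computePrefixAlsoSuffix := by
  unfold Claim_raises_computePrefixAlsoSuffix
  exact ⟨fun s _ hr hp => hp hr, by decide⟩

-- self-check: B's port really returns the stated value at the raise-witness
theorem pvRaiseWitnessOut_ok : computePrefixAlsoSuffix_alt pvRaiseWitness_computePrefixAlsoSuffix = pvRaiseWitnessOut_computePrefixAlsoSuffix := by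
  have h := computePrefixAlsoSuffix_raises
  unfold Claim_raises_computePrefixAlsoSuffix at h
  exact h.2.2.2
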